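-- pv_equiv track=rewrite | github.com/rosenrose/cos_pro | python/3차 1급 3_initial_code.py | solution
-- ===== SOURCE A (Python) =====
-- def solution(bishops):
--     checked = [[False for _ in range(8)] for _ in range(8)]
--     dirs_row = [-1, -1, 1, 1]
--     dirs_col = [-1, 1, -1, 1]
--     answer = 8 * 8
--
--     for bishop in bishops:
--         for dir_idx in range(0, 4):
--             row = ord(bishop[1]) - ord("1")
--             col = ord(bishop[0]) - ord("A")
--
--             while row in range(0, 8) and col in range(0, 8):
--                 if not checked[row][col]:
--                     checked[row][col] = True
--                     answer -= 1
--
--                 row += dirs_row[dir_idx]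
--                 col += dirs_col[dir_idx]
--
--     return answer
-- ===== SOURCE B (Python) =====
-- def solution(bishops):
--     anti = set()
--     diag = set()
--     for b in bishops:
--         row = ord(b[1]) - ord("1")
--         col = ord(b[0]) - ord("A")
--         if 0 <= row < 8 and 0 <= col < 8:
--             anti.add(row + col)
--             diag.add(row - col)
--     return sum(1 for r in range(8) for c in range(8)
--                if (r + c) not in anti and (r - c) not in diag)
-- ===== Notes on version B (the rewrite author's own statement) =====
-- stated objective: faster
-- what changed: Instead of walking rays in four directions from every bishop over a mutable 8x8 board, B records each on-board bishop's two diagonal ids (r+c, r-c) in two sets and counts the 64 squares whose diagonal ids hit neither set.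
import Mathlib
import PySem

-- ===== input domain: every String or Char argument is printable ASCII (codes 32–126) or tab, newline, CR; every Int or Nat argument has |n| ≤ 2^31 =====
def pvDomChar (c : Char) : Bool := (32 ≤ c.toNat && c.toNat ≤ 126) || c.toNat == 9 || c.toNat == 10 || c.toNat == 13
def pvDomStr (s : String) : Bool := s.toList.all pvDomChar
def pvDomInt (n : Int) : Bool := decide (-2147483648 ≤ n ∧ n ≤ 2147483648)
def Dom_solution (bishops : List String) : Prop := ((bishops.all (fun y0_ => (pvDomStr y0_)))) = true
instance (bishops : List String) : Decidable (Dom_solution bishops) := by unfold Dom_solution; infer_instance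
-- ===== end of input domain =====

-- B replaces A's four-direction ray walks over a mutable 8x8 board by two diagonal-id sets and one
-- counting pass over the 64 squares (a different algorithm; the 64-cell grid and its updates disappear).
-- ===== PORT A =====
-- checked = [[False for _ in range(8)] for _ in range(8)]
def pvGrid0 : List (List Bool) := (List.range 8).map (fun _ => (List.range 8).map (fun _ => false))
def pvDirsRow : List Int := [-1, -1, 1, 1]
def pvDirsCol : List Int := [-1, 1, -1, 1]
-- ord(bishop[1]) - ord("1"), ord(bishop[0]) - ord("A"); the .getD default is never reached
-- under Pre_solution (every string has length ≥ 2); both ports parse with these expressions.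
def pvRowOf (b : String) : Int := (((PySem.Str.pyGet? b 1).getD ' ').toNat : Int) - 49
def pvColOf (b : String) : Int := (((PySem.Str.pyGet? b 0).getD ' ').toNat : Int) - 65
-- the while loop over (row, col); the guard 0 ≤ row < 8, 0 ≤ col < 8 makes .toNat indexing exact,
-- and fuel 16 strictly exceeds the ≤ 8 on-board steps the Python while loop can take
def pvMark : Nat → Int → Int → Int → Int → List (List Bool) × Int → List (List Bool) × Int
  | 0, _, _, _, _, st => st
  | fuel+1, row, col, dr, dc, st =>
    if 0 ≤ row ∧ row < 8 ∧ 0 ≤ col ∧ col < 8 then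
      pvMark fuel (row + dr) (col + dc) dr dc
        (if (st.1.getD row.toNat []).getD col.toNat false = false then
          (st.1.set row.toNat ((st.1.getD row.toNat []).set col.toNat true), st.2 - 1)
        else st)
    else st
-- body of 'for bishop in bishops:' — the inner 'for dir_idx in range(0, 4)' loop
def pvBishop (st : List (List Bool) × Int) (b : String) : List (List Bool) × Int :=
  (PySem.List.pyRange 0 4 1).foldl (fun st dirIdx =>
    pvMark 16 (pvRowOf b) (pvColOf b)
      ((PySem.List.pyGet? pvDirsRow dirIdx).getD 0)
      ((PySem.List.pyGet? pvDirsCol dirIdx).getD 0) st) st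
def solution (bishops : List String) : Int :=
  (bishops.foldl pvBishop (pvGrid0, 8 * 8)).2
-- ===== PORT B =====
-- body of B's 'for b in bishops:' — record the two diagonal ids of an on-board bishop
def pvRecord (p : PySem.Set Int × PySem.Set Int) (b : String) : PySem.Set Int × PySem.Set Int :=
  if 0 ≤ pvRowOf b ∧ pvRowOf b < 8 ∧ 0 ≤ pvColOf b ∧ pvColOf b < 8 then
    (PySem.Set.add p.1 (pvRowOf b + pvColOf b), PySem.Set.add p.2 (pvRowOf b - pvColOf b))
  else p
def solution_alt (bishops : List String) : Int :=
  let sets := bishops.foldl pvRecord (PySem.Set.empty, PySem.Set.empty)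
  (PySem.List.pyRange 0 8 1).foldl (fun acc r =>
    (PySem.List.pyRange 0 8 1).foldl (fun acc c =>
      if (r + c) ∉ sets.1 ∧ (r - c) ∉ sets.2 then acc + 1 else acc) acc) 0
-- ===== PRECONDITION & SPEC =====
-- Pre_ excludes exactly the inputs where Python A raises IndexError: a bishop string of
-- length < 2 (bishop[0] / bishop[1] out of range); Python B raises there as well.
def Pre_solution (bishops : List String) : Prop := ∀ b ∈ bishops, 2 ≤ b.toList.length
instance (bishops : List String) : Decidable (Pre_solution bishops) := by unfold Pre_solution; infer_instance
def pvWitness_solution : List String := ["C3", "A1", "H8"]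
def Spec_solution (bishops : List String) (out : Int) : Prop := out = solution_alt bishops
instance (bishops : List String) (out : Int) : Decidable (Spec_solution bishops out) := by unfold Spec_solution; infer_instance
-- ===== CLAIM (what is proved, stated in full; the proofs are below) =====
def Claim_equal_solution : Prop := ∀ (bishops : List String), Dom_solution bishops → Pre_solution bishops → Spec_solution bishops (solution bishops)
-- ===== LEMMAS AND PROOFS =====
-- a square (r, c) is on the board
def pvBoard (r c : Int) : Prop := 0 ≤ r ∧ r < 8 ∧ 0 ≤ c ∧ c < 8
-- the cell of a grid, as A's checked[row][col] reads it
def pvCell (g : List (List Bool)) (r c : Int) : Bool := (g.getD r.toNat []).getD c.toNat false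
-- A's grid update checked[row][col] = True
def pvUpd (g : List (List Bool)) (r c : Int) : List (List Bool) :=
  g.set r.toNat ((g.getD r.toNat []).set c.toNat true)
def pvShaped (g : List (List Bool)) : Prop := g.length = 8 ∧ ∀ row ∈ g, row.length = 8
-- all 64 board squares
def pvPairs : List (Int × Int) :=
  (PySem.List.pyRange 0 8 1).flatMap (fun r => (PySem.List.pyRange 0 8 1).map (fun c => (r, c)))
-- number of unmarked squares
def pvCnt (g : List (List Bool)) : Int := (pvPairs.countP (fun q => !pvCell g q.1 q.2) : Int)
-- A's loop invariant: well-shaped grid, and answer = number of unmarked squares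
def pvInv (st : List (List Bool) × Int) : Prop := pvShaped st.1 ∧ st.2 = pvCnt st.1
-- the squares A's while loop visits from (r0, c0) in direction (dr, dc)
def pvRay (r0 c0 dr dc r c : Int) : Prop :=
  ∃ k : Int, 0 ≤ k ∧ r = r0 + k * dr ∧ c = c0 + k * dc ∧
    ∀ j : Int, 0 ≤ j → j ≤ k → pvBoard (r0 + j * dr) (c0 + j * dc)
-- square (r, c) is attacked by the bishop named by string b
def pvCov (b : String) (r c : Int) : Prop :=
  pvBoard (pvRowOf b) (pvColOf b) ∧
    (pvRowOf b + pvColOf b = r + c ∨ pvRowOf b - pvColOf b = r - c)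
lemma pvMem_pairs (q : Int × Int) : q ∈ pvPairs ↔ pvBoard q.1 q.2 := by
  obtain ⟨r, c⟩ := q
  simp only [pvPairs, List.mem_flatMap, List.mem_map]
  constructor
  · rintro ⟨a, ha, b, hb, heq⟩
    rw [PySem.List.mem_pyRange_one] at ha hb
    injection heq with e1 e2
    subst e1; subst e2
    unfold pvBoard; omega
  · intro hb
    unfold pvBoard at hb
    exact ⟨r, by rw [PySem.List.mem_pyRange_one]; omega,
           c, by rw [PySem.List.mem_pyRange_one]; omega, rfl⟩
lemma pvNodup_pairs : pvPairs.Nodup := by decide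
lemma pvShaped_upd {g : List (List Bool)} (hg : pvShaped g) {r c : Int} (h : pvBoard r c) :
    pvShaped (pvUpd g r c) := by
  obtain ⟨hlen, hrow⟩ := hg
  have hr : r.toNat < g.length := by unfold pvBoard at h; omega
  refine ⟨by simp [pvUpd, hlen], ?_⟩
  intro row hmem
  rcases List.mem_or_eq_of_mem_set hmem with hmem | rfl
  · exact hrow _ hmem
  · rw [List.length_set, List.getD_eq_getElem?_getD, List.getElem?_eq_getElem hr,
      Option.getD_some]
    exact hrow _ (List.getElem_mem hr)
lemma pvCell_upd {g : List (List Bool)} (hg : pvShaped g) {r0 c0 r c : Int}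
    (h0 : pvBoard r0 c0) (h : pvBoard r c) :
    pvCell (pvUpd g r0 c0) r c = if r = r0 ∧ c = c0 then true else pvCell g r c := by
  obtain ⟨hlen, hrow⟩ := hg
  have hr0 : r0.toNat < g.length := by unfold pvBoard at h0; omega
  have hrn : r.toNat < g.length := by unfold pvBoard at h; omega
  have hrowlen : (g[r0.toNat]?.getD []).length = 8 := by
    rw [List.getElem?_eq_getElem hr0, Option.getD_some]
    exact hrow _ (List.getElem_mem hr0)
  simp only [pvCell, pvUpd, List.getD_eq_getElem?_getD]
  rw [List.getElem?_set]
  by_cases he : r = r0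
  · subst he
    rw [if_pos rfl, if_pos hrn, Option.getD_some, List.getElem?_set]
    by_cases hc : c = c0
    · subst hc
      have hcl : c.toNat < (g[r.toNat]?.getD []).length := by
        rw [hrowlen]; unfold pvBoard at h; omega
      rw [if_pos rfl, if_pos hcl, Option.getD_some, if_pos ⟨rfl, rfl⟩]
    · have hcc : ¬ (c0.toNat = c.toNat) := by unfold pvBoard at h h0; omega
      rw [if_neg hcc, if_neg (by simp [hc])]
  · have hrr : ¬ (r0.toNat = r.toNat) := by unfold pvBoard at h h0; omega
    rw [if_neg hrr, if_neg (by simp [he])]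
lemma pvCnt_upd {g : List (List Bool)} (hg : pvShaped g) {r0 c0 : Int}
    (h0 : pvBoard r0 c0) (hf : pvCell g r0 c0 = false) :
    pvCnt (pvUpd g r0 c0) = pvCnt g - 1 := by
  have hmem : ((r0, c0) : Int × Int) ∈ pvPairs := (pvMem_pairs _).2 h0
  have hperm := List.perm_cons_erase hmem
  have e1 := List.Perm.countP_eq (fun q : Int × Int => !pvCell (pvUpd g r0 c0) q.1 q.2) hperm
  have e2 := List.Perm.countP_eq (fun q : Int × Int => !pvCell g q.1 q.2) hperm
  have hcongr : List.countP (fun q : Int × Int => !pvCell (pvUpd g r0 c0) q.1 q.2) (pvPairs.erase (r0, c0))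
      = List.countP (fun q : Int × Int => !pvCell g q.1 q.2) (pvPairs.erase (r0, c0)) := by
    apply List.countP_congr
    intro q hq
    rcases (pvNodup_pairs.mem_erase_iff).1 hq with ⟨hne, hmemq⟩
    have hb := (pvMem_pairs q).1 hmemq
    rw [pvCell_upd ⟨hg.1, hg.2⟩ h0 hb]
    have hnot : ¬ (q.1 = r0 ∧ q.2 = c0) := by
      rintro ⟨ha, hb'⟩
      exact hne (by obtain ⟨x, y⟩ := q; simp_all)
    rw [if_neg hnot]
  have hA : (!pvCell (pvUpd g r0 c0) r0 c0) = false := by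
    rw [pvCell_upd ⟨hg.1, hg.2⟩ h0 h0, if_pos ⟨rfl, rfl⟩]; rfl
  have hB : (!pvCell g r0 c0) = true := by rw [hf]; rfl
  unfold pvCnt
  rw [e1, e2]
  simp only [List.countP_cons, hA, hB, hcongr]
  push_cast
  ring
lemma pvRay_cons {r0 c0 dr dc r c : Int} (h0 : pvBoard r0 c0) :
    pvRay r0 c0 dr dc r c ↔ (r = r0 ∧ c = c0) ∨ pvRay (r0 + dr) (c0 + dc) dr dc r c := by
  constructor
  · rintro ⟨k, hk0, hr, hc, hall⟩
    rcases eq_or_lt_of_le hk0 with heq | hpos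
    · left
      constructor
      · rw [hr, ← heq]; ring
      · rw [hc, ← heq]; ring
    · right
      refine ⟨k - 1, by omega, by rw [hr]; ring, by rw [hc]; ring, ?_⟩
      intro j hj0 hjk
      have hh := hall (j + 1) (by omega) (by omega)
      have e1 : r0 + (j + 1) * dr = r0 + dr + j * dr := by ring
      have e2 : c0 + (j + 1) * dc = c0 + dc + j * dc := by ring
      rw [e1, e2] at hh
      exact hh
  · rintro (⟨rfl, rfl⟩ | ⟨k, hk0, hr, hc, hall⟩)
    · refine ⟨0, le_rfl, by ring, by ring, ?_⟩
      intro j hj0 hj1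
      have hj : j = 0 := le_antisymm hj1 hj0
      subst hj
      simpa using h0
    · refine ⟨k + 1, by omega, by rw [hr]; ring, by rw [hc]; ring, ?_⟩
      intro j hj0 hjk
      rcases eq_or_lt_of_le hj0 with heq | hpos
      · rw [← heq]
        simpa using h0
      · have hh := hall (j - 1) (by omega) (by omega)
        have e1 : r0 + dr + (j - 1) * dr = r0 + j * dr := by ring
        have e2 : c0 + dc + (j - 1) * dc = c0 + j * dc := by ring
        rw [e1, e2] at hh
        exact hh
lemma pvMark_spec (dr dc : Int) :
    ∀ (fuel : Nat) (r0 c0 : Int) (st : List (List Bool) × Int), pvInv st →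
      (pvBoard r0 c0 → ∀ k : Int, 0 ≤ k → (fuel : Int) ≤ k → ¬ pvBoard (r0 + k * dr) (c0 + k * dc)) →
      pvInv (pvMark fuel r0 c0 dr dc st) ∧
      ∀ r c : Int, pvBoard r c →
        (pvCell (pvMark fuel r0 c0 dr dc st).1 r c = true ↔
          pvCell st.1 r c = true ∨ pvRay r0 c0 dr dc r c) := by
  intro fuel
  induction fuel with
  | zero =>
    intro r0 c0 st hst H
    simp only [pvMark]
    refine ⟨hst, ?_⟩
    intro r c hb
    constructor
    · exact Or.inl
    · rintro (hh | ⟨k, hk0, rfl, rfl, hall⟩)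
      · exact hh
      · have hb0 : pvBoard r0 c0 := by simpa using hall 0 le_rfl hk0
        exact absurd (hall k hk0 le_rfl) (H hb0 k hk0 (by exact_mod_cast hk0))
  | succ fuel ih =>
    intro r0 c0 st hst H
    obtain ⟨hsh, hcnt⟩ := hst
    simp only [pvMark]
    by_cases hb0 : 0 ≤ r0 ∧ r0 < 8 ∧ 0 ≤ c0 ∧ c0 < 8
    · have hb0' : pvBoard r0 c0 := hb0
      rw [if_pos hb0]
      have H' : pvBoard (r0 + dr) (c0 + dc) → ∀ k : Int, 0 ≤ k → (fuel : Int) ≤ k →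
          ¬ pvBoard (r0 + dr + k * dr) (c0 + dc + k * dc) := by
        intro _ k hk0 hkf
        have hh := H hb0' (k + 1) (by omega) (by push_cast; omega)
        have e1 : r0 + (k + 1) * dr = r0 + dr + k * dr := by ring
        have e2 : c0 + (k + 1) * dc = c0 + dc + k * dc := by ring
        rw [e1, e2] at hh
        exact hh
      by_cases hcell : (st.1.getD r0.toNat []).getD c0.toNat false = false
      · have hcellP : pvCell st.1 r0 c0 = false := hcell
        rw [if_pos hcell]
        have hE : (st.1.set r0.toNat ((st.1.getD r0.toNat []).set c0.toNat true) : List (List Bool))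
            = pvUpd st.1 r0 c0 := rfl
        rw [hE]
        have hinv' : pvInv (pvUpd st.1 r0 c0, st.2 - 1) := by
          refine ⟨pvShaped_upd hsh hb0', ?_⟩
          show st.2 - 1 = pvCnt (pvUpd st.1 r0 c0)
          rw [pvCnt_upd hsh hb0' hcellP, hcnt]
        obtain ⟨ih1, ih2⟩ := ih (r0 + dr) (c0 + dc) (pvUpd st.1 r0 c0, st.2 - 1) hinv' H'
        refine ⟨ih1, ?_⟩
        intro r c hb
        rw [ih2 r c hb]
        show pvCell (pvUpd st.1 r0 c0) r c = true ∨ _ ↔ _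
        rw [pvCell_upd hsh hb0' hb, pvRay_cons hb0']
        by_cases he : r = r0 ∧ c = c0
        · simp [he]
        · simp only [if_neg he]
          tauto
      · rw [if_neg hcell]
        have hct : pvCell st.1 r0 c0 = true := by
          cases hx : pvCell st.1 r0 c0
          · exact absurd hx hcell
          · rfl
        obtain ⟨ih1, ih2⟩ := ih (r0 + dr) (c0 + dc) st ⟨hsh, hcnt⟩ H'
        refine ⟨ih1, ?_⟩
        intro r c hb
        rw [ih2 r c hb, pvRay_cons hb0']
        constructor
        · rintro (hh | hh)
          · exact Or.inl hh
          · exact Or.inr (Or.inr hh)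
        · rintro (hh | (⟨rfl, rfl⟩ | hh))
          · exact Or.inl hh
          · exact Or.inl hct
          · exact Or.inr hh
    · rw [if_neg hb0]
      refine ⟨⟨hsh, hcnt⟩, ?_⟩
      intro r c hb
      constructor
      · exact Or.inl
      · rintro (hh | ⟨k, hk0, rfl, rfl, hall⟩)
        · exact hh
        · exact absurd (by simpa using hall 0 le_rfl hk0) hb0
lemma pvRay_iff {dr dc r0 c0 r c : Int} (hdr : dr = 1 ∨ dr = -1) (hdc : dc = 1 ∨ dc = -1)
    (h0 : pvBoard r0 c0) (h : pvBoard r c) :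
    pvRay r0 c0 dr dc r c ↔ (r - r0) * dr = (c - c0) * dc ∧ 0 ≤ (r - r0) * dr := by
  unfold pvBoard at h0 h
  rcases hdr with rfl | rfl
  · rcases hdc with rfl | rfl
    · constructor
      · rintro ⟨k, hk0, hr, hc, -⟩
        simp only [mul_one] at hr hc ⊢
        omega
      · rintro ⟨heq, hge⟩
        simp only [mul_one] at heq hge
        refine ⟨r - r0, by omega, by simp only [mul_one]; omega, by simp only [mul_one]; omega, ?_⟩
        intro j hj0 hjk
        unfold pvBoard
        simp only [mul_one]
        omega
    · constructor
      · rintro ⟨k, hk0, hr, hc, -⟩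
        simp only [mul_one, mul_neg_one] at hr hc ⊢
        omega
      · rintro ⟨heq, hge⟩
        simp only [mul_one, mul_neg_one] at heq hge
        refine ⟨r - r0, by omega, by simp only [mul_one]; omega, by simp only [mul_neg_one]; omega, ?_⟩
        intro j hj0 hjk
        unfold pvBoard
        simp only [mul_one, mul_neg_one]
        omega
  · rcases hdc with rfl | rfl
    · constructor
      · rintro ⟨k, hk0, hr, hc, -⟩
        simp only [mul_one, mul_neg_one] at hr hc ⊢
        omega
      · rintro ⟨heq, hge⟩
        simp only [mul_one, mul_neg_one] at heq hge
        refine ⟨r0 - r, by omega, by simp only [mul_neg_one]; omega, by simp only [mul_one]; omega, ?_⟩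
        intro j hj0 hjk
        unfold pvBoard
        simp only [mul_one, mul_neg_one]
        omega
    · constructor
      · rintro ⟨k, hk0, hr, hc, -⟩
        simp only [mul_neg_one] at hr hc ⊢
        omega
      · rintro ⟨heq, hge⟩
        simp only [mul_neg_one] at heq hge
        refine ⟨r0 - r, by omega, by simp only [mul_neg_one]; omega, by simp only [mul_neg_one]; omega, ?_⟩
        intro j hj0 hjk
        unfold pvBoard
        simp only [mul_neg_one]
        omega
lemma pvRay_not_board {r0 c0 r c : Int} (h0 : ¬ pvBoard r0 c0) (dr dc : Int) :
    ¬ pvRay r0 c0 dr dc r c := by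
  rintro ⟨k, hk0, -, -, hall⟩
  exact h0 (by simpa using hall 0 le_rfl hk0)
lemma pvHfuel (dr dc : Int) (hdr : dr = 1 ∨ dr = -1) (hdc : dc = 1 ∨ dc = -1)
    (r0 c0 : Int) (hb : pvBoard r0 c0) :
    ∀ k : Int, 0 ≤ k → ((16 : Nat) : Int) ≤ k → ¬ pvBoard (r0 + k * dr) (c0 + k * dc) := by
  intro k hk0 hk16 hcontra
  unfold pvBoard at hb hcontra
  rcases hdr with rfl | rfl <;> rcases hdc with rfl | rfl <;>
    simp only [mul_one, mul_neg_one] at hcontra <;> omega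
lemma pvBishop_spec (b : String) (st : List (List Bool) × Int) (hst : pvInv st) :
    pvInv (pvBishop st b) ∧
    ∀ r c : Int, pvBoard r c →
      (pvCell (pvBishop st b).1 r c = true ↔ pvCell st.1 r c = true ∨ pvCov b r c) := by
  have hR4 : PySem.List.pyRange 0 4 1 = [0, 1, 2, 3] := by decide
  have hd0 : ((PySem.List.pyGet? pvDirsRow 0).getD 0) = -1 := by decide
  have hd1 : ((PySem.List.pyGet? pvDirsRow 1).getD 0) = -1 := by decide
  have hd2 : ((PySem.List.pyGet? pvDirsRow 2).getD 0) = 1 := by decide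
  have hd3 : ((PySem.List.pyGet? pvDirsRow 3).getD 0) = 1 := by decide
  have he0 : ((PySem.List.pyGet? pvDirsCol 0).getD 0) = -1 := by decide
  have he1 : ((PySem.List.pyGet? pvDirsCol 1).getD 0) = 1 := by decide
  have he2 : ((PySem.List.pyGet? pvDirsCol 2).getD 0) = -1 := by decide
  have he3 : ((PySem.List.pyGet? pvDirsCol 3).getD 0) = 1 := by decide
  unfold pvBishop
  rw [hR4]
  simp only [List.foldl_cons, List.foldl_nil, hd0, hd1, hd2, hd3, he0, he1, he2, he3]
  obtain ⟨i1, c1⟩ := pvMark_spec (-1) (-1) 16 (pvRowOf b) (pvColOf b) st hst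
    (fun hb => pvHfuel (-1) (-1) (Or.inr rfl) (Or.inr rfl) _ _ hb)
  obtain ⟨i2, c2⟩ := pvMark_spec (-1) 1 16 (pvRowOf b) (pvColOf b) _ i1
    (fun hb => pvHfuel (-1) 1 (Or.inr rfl) (Or.inl rfl) _ _ hb)
  obtain ⟨i3, c3⟩ := pvMark_spec 1 (-1) 16 (pvRowOf b) (pvColOf b) _ i2
    (fun hb => pvHfuel 1 (-1) (Or.inl rfl) (Or.inr rfl) _ _ hb)
  obtain ⟨i4, c4⟩ := pvMark_spec 1 1 16 (pvRowOf b) (pvColOf b) _ i3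
    (fun hb => pvHfuel 1 1 (Or.inl rfl) (Or.inl rfl) _ _ hb)
  refine ⟨i4, ?_⟩
  intro r c hb
  rw [c4 r c hb, c3 r c hb, c2 r c hb, c1 r c hb]
  by_cases hb0 : pvBoard (pvRowOf b) (pvColOf b)
  · rw [pvRay_iff (Or.inr rfl) (Or.inr rfl) hb0 hb, pvRay_iff (Or.inr rfl) (Or.inl rfl) hb0 hb,
      pvRay_iff (Or.inl rfl) (Or.inr rfl) hb0 hb, pvRay_iff (Or.inl rfl) (Or.inl rfl) hb0 hb]
    have hcov : pvCov b r c ↔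
        (pvRowOf b + pvColOf b = r + c ∨ pvRowOf b - pvColOf b = r - c) := by
      unfold pvCov
      simp [hb0]
    rw [hcov]
    by_cases hcell : pvCell st.1 r c = true
    · simp [hcell]
    · have hcf : pvCell st.1 r c = false := by
        cases hx : pvCell st.1 r c
        · rfl
        · exact absurd hx hcell
      rw [hcf]
      simp only [Bool.false_eq_true, false_or]
      unfold pvBoard at hb0 hb
      omega
  · have hnr := pvRay_not_board hb0 (r := r) (c := c)
    have hncov : ¬ pvCov b r c := fun hcv => hb0 hcv.1
    simp [hnr, hncov]
lemma pvFold_spec (bishops : List String) :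
    ∀ st : List (List Bool) × Int, pvInv st →
      pvInv (bishops.foldl pvBishop st) ∧
      ∀ r c : Int, pvBoard r c →
        (pvCell (bishops.foldl pvBishop st).1 r c = true ↔
          pvCell st.1 r c = true ∨ ∃ b ∈ bishops, pvCov b r c) := by
  induction bishops with
  | nil =>
    intro st hst
    refine ⟨hst, ?_⟩
    intro r c hb
    simp
  | cons b bs ih =>
    intro st hst
    rw [List.foldl_cons]
    obtain ⟨h1, h2⟩ := pvBishop_spec b st hst
    obtain ⟨h3, h4⟩ := ih (pvBishop st b) h1
    refine ⟨h3, ?_⟩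
    intro r c hb
    rw [h4 r c hb, h2 r c hb]
    constructor
    · rintro ((hh | hh) | ⟨x, hx, hc⟩)
      · exact Or.inl hh
      · exact Or.inr ⟨b, List.mem_cons_self, hh⟩
      · exact Or.inr ⟨x, List.mem_cons_of_mem _ hx, hc⟩
    · rintro (hh | ⟨x, hx, hc⟩)
      · exact Or.inl (Or.inl hh)
      · rcases List.mem_cons.1 hx with rfl | hx'
        · exact Or.inl (Or.inr hc)
        · exact Or.inr ⟨x, hx', hc⟩
lemma pvGrid0_cell {r c : Int} (h : pvBoard r c) : pvCell pvGrid0 r c = false := by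
  have h64 : ∀ n < 8, ∀ m < 8, ((pvGrid0.getD n []).getD m false) = false := by decide
  unfold pvCell
  exact h64 r.toNat (by unfold pvBoard at h; omega) c.toNat (by unfold pvBoard at h; omega)
lemma pvInv_init : pvInv (pvGrid0, 8 * 8) := by
  constructor
  · constructor
    · decide
    · decide
  · decide
lemma pvRecord_fold_mem (bishops : List String) :
    ∀ (p : PySem.Set Int × PySem.Set Int) (x : Int),
      ((x ∈ (bishops.foldl pvRecord p).1 ↔
        x ∈ p.1 ∨ ∃ b ∈ bishops, pvBoard (pvRowOf b) (pvColOf b) ∧ x = pvRowOf b + pvColOf b) ∧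
      (x ∈ (bishops.foldl pvRecord p).2 ↔
        x ∈ p.2 ∨ ∃ b ∈ bishops, pvBoard (pvRowOf b) (pvColOf b) ∧ x = pvRowOf b - pvColOf b)) := by
  induction bishops with
  | nil =>
    intro p x
    constructor <;> simp
  | cons b bs ih =>
    intro p x
    rw [List.foldl_cons]
    obtain ⟨ih1, ih2⟩ := ih (pvRecord p b) x
    have hrec1 : x ∈ (pvRecord p b).1 ↔
        x ∈ p.1 ∨ (pvBoard (pvRowOf b) (pvColOf b) ∧ x = pvRowOf b + pvColOf b) := by
      unfold pvRecord
      by_cases hb0 : 0 ≤ pvRowOf b ∧ pvRowOf b < 8 ∧ 0 ≤ pvColOf b ∧ pvColOf b < 8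
      · rw [if_pos hb0]
        dsimp only
        rw [PySem.Set.mem_add]
        have hbb : pvBoard (pvRowOf b) (pvColOf b) := hb0
        constructor
        · rintro (h | h)
          · exact Or.inl h
          · exact Or.inr ⟨hbb, h⟩
        · rintro (h | ⟨-, h⟩)
          · exact Or.inl h
          · exact Or.inr h
      · rw [if_neg hb0]
        have hbb : ¬ pvBoard (pvRowOf b) (pvColOf b) := hb0
        constructor
        · exact Or.inl
        · rintro (h | ⟨hb', -⟩)
          · exact h
          · exact absurd hb' hbb
    have hrec2 : x ∈ (pvRecord p b).2 ↔
        x ∈ p.2 ∨ (pvBoard (pvRowOf b) (pvColOf b) ∧ x = pvRowOf b - pvColOf b) := by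
      unfold pvRecord
      by_cases hb0 : 0 ≤ pvRowOf b ∧ pvRowOf b < 8 ∧ 0 ≤ pvColOf b ∧ pvColOf b < 8
      · rw [if_pos hb0]
        dsimp only
        rw [PySem.Set.mem_add]
        have hbb : pvBoard (pvRowOf b) (pvColOf b) := hb0
        constructor
        · rintro (h | h)
          · exact Or.inl h
          · exact Or.inr ⟨hbb, h⟩
        · rintro (h | ⟨-, h⟩)
          · exact Or.inl h
          · exact Or.inr h
      · rw [if_neg hb0]
        have hbb : ¬ pvBoard (pvRowOf b) (pvColOf b) := hb0
        constructor
        · exact Or.inl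
        · rintro (h | ⟨hb', -⟩)
          · exact h
          · exact absurd hb' hbb
    constructor
    · rw [ih1, hrec1]
      constructor
      · rintro ((hh | hh) | ⟨y, hy, hc⟩)
        · exact Or.inl hh
        · exact Or.inr ⟨b, List.mem_cons_self, hh⟩
        · exact Or.inr ⟨y, List.mem_cons_of_mem _ hy, hc⟩
      · rintro (hh | ⟨y, hy, hc⟩)
        · exact Or.inl (Or.inl hh)
        · rcases List.mem_cons.1 hy with rfl | hy'
          · exact Or.inl (Or.inr hc)
          · exact Or.inr ⟨y, hy', hc⟩
    · rw [ih2, hrec2]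
      constructor
      · rintro ((hh | hh) | ⟨y, hy, hc⟩)
        · exact Or.inl hh
        · exact Or.inr ⟨b, List.mem_cons_self, hh⟩
        · exact Or.inr ⟨y, List.mem_cons_of_mem _ hy, hc⟩
      · rintro (hh | ⟨y, hy, hc⟩)
        · exact Or.inl (Or.inl hh)
        · rcases List.mem_cons.1 hy with rfl | hy'
          · exact Or.inl (Or.inr hc)
          · exact Or.inr ⟨y, hy', hc⟩
lemma pvFoldl_count (rows cols : List Int) (p : Int → Int → Prop) [∀ r c, Decidable (p r c)] (a : Int) :
    rows.foldl (fun acc r => cols.foldl (fun acc c => if p r c then acc + 1 else acc) acc) a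
      = a + ((rows.flatMap (fun r => cols.map (fun c => (r, c)))).countP
          (fun q => decide (p q.1 q.2)) : Int) := by
  induction rows generalizing a with
  | nil => simp
  | cons r rs ih =>
    rw [List.foldl_cons, ih, PySem.List.foldl_ite_add_one (p r) cols a]
    rw [List.flatMap_cons, List.countP_append, List.countP_map]
    have hcomp : ((fun q : Int × Int => decide (p q.1 q.2)) ∘ fun c => (r, c))
        = fun c => decide (p r c) := rfl
    rw [hcomp]
    push_cast
    ring
-- ===== VERDICT (by name: the statement is the Claim_ definition above) =====
theorem solution_spec : Claim_equal_solution := by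
  intro bishops _ _
  unfold Spec_solution solution
  simp only [solution_alt]
  obtain ⟨⟨hsh, hcnt⟩, hcell⟩ := pvFold_spec bishops (pvGrid0, 8 * 8) pvInv_init
  rw [hcnt]
  rw [pvFoldl_count (PySem.List.pyRange 0 8 1) (PySem.List.pyRange 0 8 1)
    (fun r c => (r + c) ∉ (bishops.foldl pvRecord (PySem.Set.empty, PySem.Set.empty)).1 ∧
                (r - c) ∉ (bishops.foldl pvRecord (PySem.Set.empty, PySem.Set.empty)).2) 0]
  rw [zero_add]
  rw [show ((PySem.List.pyRange 0 8 1).flatMap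
      (fun r => (PySem.List.pyRange 0 8 1).map (fun c => (r, c)))) = pvPairs from rfl]
  unfold pvCnt
  have hmain : List.countP (fun q : Int × Int =>
        !pvCell (bishops.foldl pvBishop (pvGrid0, 8 * 8)).1 q.1 q.2) pvPairs
      = List.countP (fun q : Int × Int =>
          decide ((q.1 + q.2) ∉ (bishops.foldl pvRecord (PySem.Set.empty, PySem.Set.empty)).1 ∧
                  (q.1 - q.2) ∉ (bishops.foldl pvRecord (PySem.Set.empty, PySem.Set.empty)).2)) pvPairs := by
    apply List.countP_congr
    intro q hq
    have hb := (pvMem_pairs q).1 hq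
    have hc := hcell q.1 q.2 hb
    have hg0 := pvGrid0_cell hb
    have m1 : (q.1 + q.2) ∈ (bishops.foldl pvRecord (PySem.Set.empty, PySem.Set.empty)).1 ↔
        ∃ b ∈ bishops, pvBoard (pvRowOf b) (pvColOf b) ∧ q.1 + q.2 = pvRowOf b + pvColOf b := by
      rw [(pvRecord_fold_mem bishops (PySem.Set.empty, PySem.Set.empty) (q.1 + q.2)).1]
      simp [PySem.Set.empty]
    have m2 : (q.1 - q.2) ∈ (bishops.foldl pvRecord (PySem.Set.empty, PySem.Set.empty)).2 ↔
        ∃ b ∈ bishops, pvBoard (pvRowOf b) (pvColOf b) ∧ q.1 - q.2 = pvRowOf b - pvColOf b := by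
      rw [(pvRecord_fold_mem bishops (PySem.Set.empty, PySem.Set.empty) (q.1 - q.2)).2]
      simp [PySem.Set.empty]
    rw [Bool.not_eq_true', decide_eq_true_eq]
    constructor
    · intro hf
      have hnot : ¬ (pvCell pvGrid0 q.1 q.2 = true ∨ ∃ b ∈ bishops, pvCov b q.1 q.2) := by
        rw [← hc, hf]
        exact Bool.false_ne_true
      have hn2 : ∀ y ∈ bishops, ¬ pvCov y q.1 q.2 := fun y hy hcv => hnot (Or.inr ⟨y, hy, hcv⟩)
      constructor
      · intro hmem
        obtain ⟨y, hy, hbd, heq⟩ := m1.1 hmem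
        exact hn2 y hy ⟨hbd, Or.inl heq.symm⟩
      · intro hmem
        obtain ⟨y, hy, hbd, heq⟩ := m2.1 hmem
        exact hn2 y hy ⟨hbd, Or.inr heq.symm⟩
    · rintro ⟨hs1, hs2⟩
      cases hcv : pvCell (bishops.foldl pvBishop (pvGrid0, 8 * 8)).1 q.1 q.2
      · rfl
      · exfalso
        rcases hc.1 hcv with h0 | ⟨y, hy, hbd, hse | hde⟩
        · rw [hg0] at h0
          cases h0
        · exact hs1 (m1.2 ⟨y, hy, hbd, hse.symm⟩)
        · exact hs2 (m2.2 ⟨y, hy, hbd, hde.symm⟩)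
  exact_mod_cast congrArg (fun n : Nat => (n : Int)) hmain
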